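-- pv_equiv track=rewrite | github.com/marinalonsoparra/game2048new | game2048/grid_2048.py | grid_to_string_with_size
-- ===== SOURCE A (Python) =====
-- def long_value(grid):
--     long_max=0
--     elem_final=""
--
--     for row in grid:
--         for elem in row:
--             if len(str(elem))>long_max:
--                 long_max=len(str(elem))
--                 elem_final=elem
--
--     return long_max,elem_final
--
-- def grid_to_string_with_size(grid,n):
--     #longitud=len(grid)
--     longitud=n
--     lon_tile,elem=long_value(grid)
--
--     string=""
--
--
--     tile=""
--     for i in range(lon_tile+1):
--         tile=tile+"="
--
--
--     line=tile*longitud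
--     line=line+"="
--
--
--     row=0
--     for j in range(0,(2*longitud)+1):
--
--             if j%2 == 0:
--                 string =string+line
--
--
--             if j%2 != 0:
--
--                 for i in range(0,longitud):
--                     string=string+tile_to_string(grid[row][i],lon_tile)
--                 string=string+"|"
--                 row+=1
--
--             string=string+"\n"
--     return string
--
-- def tile_to_string(element,lon_tile):
--     string="|"
--     if len(str(element))==lon_tile:
--         string=string+str(str(element))
--     else:
--         size=lon_tile-int(len(str(element)))
--         espaces=' '*size
--         string=string+str(element)+espaces
--     return string
-- ===== SOURCE B (Python) =====
-- def _char_at(grid, w, j, k):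
--     if j % 2 == 0:
--         return '='
--     q, r = divmod(k, w + 1)
--     if r == 0:
--         return '|'
--     s = str(grid[j // 2][q])
--     return s[r - 1] if r - 1 < len(s) else ' '
--
-- def grid_to_string_with_size(grid, n):
--     w = 0
--     for row in grid:
--         for e in row:
--             w = max(w, len(str(e)))
--     W = (w + 1) * n + 1
--     out = []
--     for j in range(2 * n + 1):
--         for k in range(W):
--             out.append(_char_at(grid, w, j, k))
--         out.append('\n')
--     return ''.join(out)
-- ===== Notes on version B (the rewrite author's own statement) =====
-- stated objective: alternative
-- what changed: B renders the output as a pure coordinate function: for each line index j and column k it computes the single character directly by arithmetic (j parity for separator lines, divmod(k, w+1) to locate the cell and the position inside it, indexing into str(e) or a space), instead of A's staged construction of tile/separator/row strings by concatenation and padding.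
import Mathlib
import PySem

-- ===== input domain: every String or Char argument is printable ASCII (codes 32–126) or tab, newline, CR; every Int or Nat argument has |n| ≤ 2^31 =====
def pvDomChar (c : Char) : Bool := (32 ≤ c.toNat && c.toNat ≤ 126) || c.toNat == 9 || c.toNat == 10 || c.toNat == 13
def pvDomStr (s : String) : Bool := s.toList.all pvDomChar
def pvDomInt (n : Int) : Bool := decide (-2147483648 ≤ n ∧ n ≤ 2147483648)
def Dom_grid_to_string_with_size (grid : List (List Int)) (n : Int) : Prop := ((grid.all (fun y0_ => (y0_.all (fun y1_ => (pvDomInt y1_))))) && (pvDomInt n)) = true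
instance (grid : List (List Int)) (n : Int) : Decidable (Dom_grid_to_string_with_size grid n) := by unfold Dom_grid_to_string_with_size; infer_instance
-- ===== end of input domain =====

-- B computes every output character directly from its (line, column) coordinates (parity + divmod),
-- instead of A's staged construction of tile/separator/row strings (objective: alternative).

-- ===== PORT A =====
-- helper long_value: returns (long_max, elem_final); elem_final starts as "" (ported as none, never read).
def pvLongValue (grid : List (List Int)) : Int × Option Int :=
  grid.foldl (fun s row =>
    row.foldl (fun s elem =>
      if ((PySem.Int.toChars elem).length : Int) > s.1 then
        (((PySem.Int.toChars elem).length : Int), some elem)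
      else s) s)
    (0, none)

-- helper tile_to_string
def pvTileToString (element : Int) (lon_tile : Int) : List Char :=
  let string := ['|']
  if ((PySem.Int.toChars element).length : Int) = lon_tile then
    string ++ PySem.Int.toChars element
  else
    let size := lon_tile - ((PySem.Int.toChars element).length : Int)
    let espaces := PySem.List.pyRepeat [' '] size
    string ++ PySem.Int.toChars element ++ espaces

def grid_to_string_with_size (grid : List (List Int)) (n : Int) : String :=
  let longitud := n
  let lon_tile := (pvLongValue grid).1
  let tile := (PySem.List.pyRange 0 (lon_tile + 1) 1).foldl (fun t _ => t ++ ['=']) []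
  let line := PySem.List.pyRepeat tile longitud ++ ['=']
  let res := (PySem.List.pyRange 0 (2 * longitud + 1) 1).foldl
    (fun (st : List Char × Int) j =>
      let s := if PySem.Int.mod j 2 = 0 then st.1 ++ line else st.1
      let sr :=
        if PySem.Int.mod j 2 ≠ 0 then
          (((PySem.List.pyRange 0 longitud 1).foldl (fun s i =>
              s ++ pvTileToString (PySem.List.pyGetD (PySem.List.pyGetD grid st.2 []) i 0) lon_tile) s) ++ ['|'],
           st.2 + 1)
        else (s, st.2)
      (sr.1 ++ ['\n'], sr.2))
    ([], 0)
  String.ofList res.1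

-- ===== PORT B =====
-- helper _char_at(grid, w, j, k): the character at line j, column k (s[r-1] is guarded in range,
-- so pyGetD with default ' ' is exact here)
def pvCharAt (grid : List (List Int)) (w : Int) (j : Int) (k : Int) : Char :=
  if PySem.Int.mod j 2 = 0 then '='
  else
    let q := PySem.Int.floordiv k (w + 1)
    let r := PySem.Int.mod k (w + 1)
    if r = 0 then '|'
    else
      let s := PySem.Int.toChars
        (PySem.List.pyGetD (PySem.List.pyGetD grid (PySem.Int.floordiv j 2) []) q 0)
      if r - 1 < (s.length : Int) then PySem.List.pyGetD s (r - 1) ' ' else ' '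

def grid_to_string_with_size_alt (grid : List (List Int)) (n : Int) : String :=
  let w := grid.foldl (fun w row =>
    row.foldl (fun w e => max w ((PySem.Int.toChars e).length : Int)) w) 0
  let W := (w + 1) * n + 1
  let out := (PySem.List.pyRange 0 (2 * n + 1) 1).foldl
    (fun acc j =>
      ((PySem.List.pyRange 0 W 1).foldl (fun a k => a ++ [pvCharAt grid w j k]) acc) ++ ['\n'])
    []
  String.ofList out

-- ===== PRECONDITION & SPEC =====
-- Pre_ excludes exactly the inputs on which A raises IndexError: 0 ≤ n but the grid does not
-- provide n rows each of at least n columns.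
def Pre_grid_to_string_with_size (grid : List (List Int)) (n : Int) : Prop :=
  0 ≤ n → (n.toNat ≤ grid.length ∧ ∀ row ∈ grid.take n.toNat, n.toNat ≤ row.length)
instance (grid : List (List Int)) (n : Int) : Decidable (Pre_grid_to_string_with_size grid n) := by
  unfold Pre_grid_to_string_with_size; infer_instance

def pvWitness_grid_to_string_with_size : List (List Int) × Int := ([[2, 4], [16, 0]], 2)

def Spec_grid_to_string_with_size (grid : List (List Int)) (n : Int) (out : String) : Prop := out = grid_to_string_with_size_alt grid n
instance (grid : List (List Int)) (n : Int) (out : String) : Decidable (Spec_grid_to_string_with_size grid n out) := by unfold Spec_grid_to_string_with_size; infer_instance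

-- ===== CLAIM (what is proved, stated in full; the proofs are below) =====
def Claim_equal_grid_to_string_with_size : Prop := ∀ (grid : List (List Int)) (n : Int), Dom_grid_to_string_with_size grid n → Pre_grid_to_string_with_size grid n → Spec_grid_to_string_with_size grid n (grid_to_string_with_size grid n)

-- ===== LEMMAS AND PROOFS =====

-- maximal cell width, flattened form (canonical for both ports)
def pvMaxLen (grid : List (List Int)) : Int :=
  (grid.flatMap (fun row => row.map (fun e => ((PySem.Int.toChars e).length : Int)))).foldl max 0

def pvLjust (cs : List Char) (w : Int) : List Char :=
  cs ++ List.replicate (w - cs.length).toNat ' '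

-- canonical shape both renderings are reduced to
def pvCanon (grid : List (List Int)) (m : Nat) : List Char :=
  let L := pvMaxLen grid
  let sep := List.replicate (m * (L + 1).toNat + 1) '='
  sep ++ '\n' :: ((grid.take m).map (fun row =>
    (((row.take m).map (fun e => '|' :: pvLjust (PySem.Int.toChars e) L)).flatten ++ ['|'])
      ++ '\n' :: sep ++ ['\n'])).flatten

theorem pvRowMax (xs : List Int) (s : Int × Option Int) :
    (xs.foldl (fun s elem =>
      if ((PySem.Int.toChars elem).length : Int) > s.1 then
        (((PySem.Int.toChars elem).length : Int), some elem) else s) s).1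
    = xs.foldl (fun a e => max a ((PySem.Int.toChars e).length : Int)) s.1 := by
  induction xs generalizing s with
  | nil => rfl
  | cons x t ih =>
    simp only [List.foldl_cons]
    by_cases h : ((PySem.Int.toChars x).length : Int) > s.1
    · rw [if_pos h, ih, max_eq_right (le_of_lt h)]
    · rw [if_neg h, ih, max_eq_left (not_lt.mp h)]

theorem pvLongValue_fst (grid : List (List Int)) :
    (pvLongValue grid).1 = pvMaxLen grid := by
  unfold pvLongValue pvMaxLen
  suffices h : ∀ (g : List (List Int)) (s : Int × Option Int),
      (g.foldl (fun s row =>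
        row.foldl (fun s elem =>
          if ((PySem.Int.toChars elem).length : Int) > s.1 then
            (((PySem.Int.toChars elem).length : Int), some elem) else s) s) s).1
      = (g.flatMap (fun row => row.map (fun e => ((PySem.Int.toChars e).length : Int)))).foldl max s.1 by
    exact h grid (0, none)
  intro g
  induction g with
  | nil => intro s; rfl
  | cons r t ih =>
    intro s
    simp only [List.foldl_cons, List.flatMap_cons, List.foldl_append]
    rw [ih, pvRowMax, List.foldl_map]

-- B's nested running max equals the same flattened max
theorem pvWfold (grid : List (List Int)) :
    grid.foldl (fun w row =>
      row.foldl (fun w e => max w ((PySem.Int.toChars e).length : Int)) w) 0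
    = pvMaxLen grid := by
  unfold pvMaxLen
  suffices h : ∀ (g : List (List Int)) (s : Int),
      g.foldl (fun w row =>
        row.foldl (fun w e => max w ((PySem.Int.toChars e).length : Int)) w) s
      = (g.flatMap (fun row => row.map (fun e => ((PySem.Int.toChars e).length : Int)))).foldl max s by
    exact h grid 0
  intro g
  induction g with
  | nil => intro s; rfl
  | cons r t ih =>
    intro s
    simp only [List.foldl_cons, List.flatMap_cons, List.foldl_append]
    rw [ih, List.foldl_map]

theorem pvMaxLen_nonneg (grid : List (List Int)) : 0 ≤ pvMaxLen grid :=
  (PySem.List.le_foldl_max _ _).1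

theorem pvMaxLen_bound (grid : List (List Int)) (row : List Int) (e : Int)
    (hr : row ∈ grid) (he : e ∈ row) :
    ((PySem.Int.toChars e).length : Int) ≤ pvMaxLen grid := by
  apply (PySem.List.le_foldl_max _ _).2
  simp only [List.mem_flatMap, List.mem_map]
  exact ⟨row, hr, e, he, rfl⟩

theorem pvTileFold {α : Type} (l : List α) (acc : List Char) :
    l.foldl (fun t _ => t ++ ['=']) acc = acc ++ List.replicate l.length '=' := by
  induction l generalizing acc with
  | nil => simp
  | cons x t ih =>
    rw [List.foldl_cons, ih, List.length_cons, List.append_assoc]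
    simp [List.replicate_succ]

theorem pvRepRep (a : Nat) (c : Char) (n : Int) :
    PySem.List.pyRepeat (List.replicate a c) n = List.replicate (n.toNat * a) c := by
  simp [PySem.List.pyRepeat]

theorem pvTileEqLjust (e L : Int) :
    pvTileToString e L = '|' :: pvLjust (PySem.Int.toChars e) L := by
  unfold pvTileToString pvLjust
  by_cases h : ((PySem.Int.toChars e).length : Int) = L
  · rw [if_pos h]
    simp [← h]
  · rw [if_neg h]
    simp [PySem.List.pyRepeat_singleton]

theorem pvMapGetDRangeTake {α : Type} (xs : List α) (d : α) (m : Nat) (h : m ≤ xs.length) :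
    (PySem.List.pyRange 0 (m:Int) 1).map (fun j => PySem.List.pyGetD xs j d) = xs.take m := by
  induction m with
  | zero => simp [PySem.List.pyRange_one_eq_nil]
  | succ k ih =>
    rw [show ((k+1 : Nat) : Int) = (k : Int) + 1 by push_cast; ring,
        PySem.List.pyRange_one_succ_right (by positivity)]
    rw [List.map_append, ih (by omega), List.take_add_one]
    simp [List.getElem?_eq_getElem (show k < xs.length by omega)]

theorem pvMapAccTake {α β : Type} (xs : List α) (d : α) (G : α → β) (m : Nat) (h : m ≤ xs.length) :
    (List.range m).map (fun (k : Nat) => G (PySem.List.pyGetD xs (k:Int) d)) = (xs.take m).map G := by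
  induction m with
  | zero => simp
  | succ k ih =>
    have hk : k < xs.length := by omega
    rw [List.range_succ, List.map_append, ih (by omega), List.take_add_one, List.map_append]
    simp [List.getElem?_eq_getElem hk, List.getD]

theorem pvLoopA (line : List Char) (g : Int → Int → List Char) (n : Int) (m : Nat) :
    (PySem.List.pyRange 0 (2*(m:Int)+1) 1).foldl
      (fun (st : List Char × Int) j =>
        let s := if PySem.Int.mod j 2 = 0 then st.1 ++ line else st.1
        let sr :=
          if PySem.Int.mod j 2 ≠ 0 then
            (((PySem.List.pyRange 0 n 1).foldl (fun s i => s ++ g st.2 i) s) ++ ['|'], st.2 + 1)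
          else (s, st.2)
        (sr.1 ++ ['\n'], sr.2)) ([], 0)
    = (line ++ '\n' :: ((List.range m).map (fun (k : Nat) =>
         (PySem.List.pyRange 0 n 1).flatMap (g (k:Int)) ++ '|' :: '\n' :: line ++ ['\n'])).flatten,
       (m:Int)) := by
  induction m with
  | zero =>
    rw [show (2*((0:Nat):Int)+1) = 0 + 1 by ring, PySem.List.pyRange_one_singleton]
    simp [PySem.Int.mod]
  | succ k ih =>
    rw [show (2*((k+1:Nat):Int)+1) = (2*(k:Int)+1) + 1 + 1 from by push_cast; ring]
    rw [PySem.List.pyRange_one_succ_right (a := 0) (b := 2*(k:Int)+1+1) (by positivity),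
        PySem.List.pyRange_one_succ_right (a := 0) (b := 2*(k:Int)+1) (by positivity)]
    rw [List.foldl_append, List.foldl_append, ih]
    simp only [List.foldl_cons, List.foldl_nil]
    rw [show PySem.Int.mod (2*(k:Int)+1) 2 = 1 from by simp [PySem.Int.mod],
        show PySem.Int.mod (2*(k:Int)+1+1) 2 = 0 from by
          simp [PySem.Int.mod, show 2*(k:Int)+1+1 = 2*((k:Int)+1) from by ring, Int.mul_fmod_right]]
    simp only [if_neg (by omega : ¬ (1:Int) = 0), if_pos (show (1:Int) ≠ 0 by omega),
               if_neg (show ¬ ((0:Int) ≠ 0) by omega)]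
    rw [PySem.List.foldl_append_eq_flatMap]
    simp [List.range_succ]

-- A reduces to the canonical shape
theorem pvA_eq (grid : List (List Int)) (m : Nat) (hlen : m ≤ grid.length)
    (hrows : ∀ row ∈ grid.take m, m ≤ row.length) :
    grid_to_string_with_size grid (m : Int) = String.ofList (pvCanon grid m) := by
  simp only [grid_to_string_with_size, pvLongValue_fst]
  rw [pvTileFold]
  simp only [PySem.List.length_pyRange_one, sub_zero, List.nil_append]
  rw [pvRepRep]
  simp only [Int.toNat_natCast]
  rw [pvLoopA (line := List.replicate (m * (pvMaxLen grid + 1).toNat) '=' ++ ['='])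
        (g := fun row i => pvTileToString
                (PySem.List.pyGetD (PySem.List.pyGetD grid row []) i 0) (pvMaxLen grid))
        ((m : Int)) m]
  dsimp only
  rw [pvMapAccTake grid ([] : List Int)
      (fun R => (PySem.List.pyRange 0 (m:Int) 1).flatMap
          (fun i => pvTileToString (PySem.List.pyGetD R i 0) (pvMaxLen grid)) ++
        '|' :: '\n' :: (List.replicate (m * (pvMaxLen grid + 1).toNat) '=' ++ ['=']) ++ ['\n'])
      m hlen]
  refine congrArg String.ofList ?_
  simp only [pvCanon]
  have hrows_eq : ∀ row ∈ grid.take m,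
      ((PySem.List.pyRange 0 (m:Int) 1).flatMap
          (fun i => pvTileToString (PySem.List.pyGetD row i 0) (pvMaxLen grid)) ++
        '|' :: '\n' :: (List.replicate (m * (pvMaxLen grid + 1).toNat) '=' ++ ['=']) ++ ['\n'])
      = ((((row.take m).map (fun e => '|' :: pvLjust (PySem.Int.toChars e) (pvMaxLen grid))).flatten ++ ['|'])
          ++ '\n' :: List.replicate (m * (pvMaxLen grid + 1).toNat + 1) '=' ++ ['\n']) := by
    intro row hrow
    have hr : m ≤ row.length := hrows row hrow
    rw [List.flatMap_def, ← pvMapGetDRangeTake row 0 m hr, List.map_map]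
    simp [Function.comp_def, pvTileEqLjust, List.replicate_succ', List.append_assoc]
  rw [List.map_congr_left hrows_eq]
  simp [List.replicate_succ', List.append_assoc]

-- ===== B-side lemmas =====

theorem pvInnerFold (l : List Int) (f : Int → Char) (acc : List Char) :
    l.foldl (fun a k => a ++ [f k]) acc = acc ++ l.map f := by
  induction l generalizing acc with
  | nil => simp
  | cons x t ih => rw [List.foldl_cons, ih]; simp

theorem pvOuterFold (l : List Int) (W : Int) (f : Int → Int → Char) (init : List Char) :
    l.foldl (fun acc j =>
        ((PySem.List.pyRange 0 W 1).foldl (fun a k => a ++ [f j k]) acc) ++ ['\n']) init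
    = init ++ l.flatMap (fun j => (PySem.List.pyRange 0 W 1).map (f j) ++ ['\n']) := by
  induction l generalizing init with
  | nil => simp
  | cons x t ih =>
    rw [List.foldl_cons, pvInnerFold, ih]
    simp

theorem pvLoopB (g : Int → List Char) (m : Nat) :
    (PySem.List.pyRange 0 (2*(m:Int)+1) 1).flatMap g
    = g 0 ++ ((List.range m).map (fun (r : Nat) => g (2*(r:Int)+1) ++ g (2*(r:Int)+2))).flatten := by
  induction m with
  | zero =>
    rw [show (2*((0:Nat):Int)+1) = 0 + 1 by ring, PySem.List.pyRange_one_singleton]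
    simp
  | succ k ih =>
    rw [show (2*((k+1:Nat):Int)+1) = (2*(k:Int)+1) + 1 + 1 from by push_cast; ring]
    rw [PySem.List.pyRange_one_succ_right (a := 0) (b := 2*(k:Int)+1+1) (by positivity),
        PySem.List.pyRange_one_succ_right (a := 0) (b := 2*(k:Int)+1) (by positivity)]
    rw [List.flatMap_append, List.flatMap_append, ih]
    simp [List.range_succ, show (2*(k:Int)+1)+1 = 2*(k:Int)+2 from by ring]

theorem pvModOdd (r : Int) : PySem.Int.mod (2*r+1) 2 = 1 := by
  rw [PySem.Int.mod_eq_emod_of_pos (by norm_num)]; omega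

theorem pvModEven (j : Int) (h : ∃ r, j = 2*r) : PySem.Int.mod j 2 = 0 := by
  obtain ⟨r, rfl⟩ := h
  rw [PySem.Int.mod_eq_emod_of_pos (by norm_num)]; omega

theorem pvFdOdd (r : Int) : PySem.Int.floordiv (2*r+1) 2 = r := by
  rw [PySem.Int.floordiv_eq_iff_of_pos (by norm_num)]; omega

theorem pvFdBlock (w p t : Int) (hw : 0 ≤ w) (h0 : 0 ≤ t) (h1 : t < w + 1) :
    PySem.Int.floordiv ((w+1)*p + t) (w+1) = p := by
  rw [PySem.Int.floordiv_eq_iff_of_pos (by omega)]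
  constructor <;> nlinarith

theorem pvModBlock (w p t : Int) (hw : 0 ≤ w) (h0 : 0 ≤ t) (h1 : t < w + 1) :
    PySem.Int.mod ((w+1)*p + t) (w+1) = t := by
  have h := PySem.Int.floordiv_mul_add_mod ((w+1)*p + t) (w+1)
  rw [pvFdBlock w p t hw h0 h1] at h
  nlinarith [h]

-- an even line of B is a row of '='
theorem pvEvenLine (grid : List (List Int)) (w j W : Int) (hj : PySem.Int.mod j 2 = 0) :
    (PySem.List.pyRange 0 W 1).map (pvCharAt grid w j) = List.replicate W.toNat '=' := by
  have : ∀ k, pvCharAt grid w j k = '=' := by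
    intro k; unfold pvCharAt; rw [if_pos hj]
  calc (PySem.List.pyRange 0 W 1).map (pvCharAt grid w j)
      = (PySem.List.pyRange 0 W 1).map (fun _ => '=') := List.map_congr_left (fun k _ => this k)
    _ = List.replicate W.toNat '=' := by
        rw [List.map_const']; simp [PySem.List.length_pyRange_one]

-- padding a string to width wn by coordinates equals ljust
theorem pvRangePad (s : List Char) (wn : Nat) (h : s.length ≤ wn) :
    (List.range wn).map (fun t => if t < s.length then s.getD t ' ' else ' ')
    = s ++ List.replicate (wn - s.length) ' ' := by
  apply List.ext_getElem
  · simp; omega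
  · intro i h1 h2
    simp only [List.getElem_map, List.getElem_range, List.getElem_append]
    by_cases hi : i < s.length
    · simp [hi]
    · simp [hi]

-- one cell block of an odd line
theorem pvBlock (grid : List (List Int)) (w : Int) (hw : 0 ≤ w) (r : Int) (row : List Int)
    (hrow : PySem.List.pyGetD grid r [] = row) (p : Nat) (hp : p < row.length)
    (hb : ((PySem.Int.toChars row[p]).length : Int) ≤ w) :
    (List.range (w+1).toNat).map (fun (t : Nat) => pvCharAt grid w (2*r+1) ((w+1)*(p:Int) + (t:Int)))
    = '|' :: pvLjust (PySem.Int.toChars row[p]) w := by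
  have hwn : (w+1).toNat = w.toNat + 1 := by omega
  have hch : ∀ t : Nat, (t:Int) < w + 1 →
      pvCharAt grid w (2*r+1) ((w+1)*(p:Int) + (t:Int))
      = (if (t:Int) = 0 then '|'
         else if (t:Int) - 1 < ((PySem.Int.toChars row[p]).length : Int)
              then PySem.List.pyGetD (PySem.Int.toChars row[p]) ((t:Int) - 1) ' ' else ' ') := by
    intro t ht
    unfold pvCharAt
    rw [if_neg (by rw [pvModOdd]; omega)]
    simp only [pvFdOdd, pvFdBlock w (p:Int) (t:Int) hw (by positivity) ht,
               pvModBlock w (p:Int) (t:Int) hw (by positivity) ht, hrow]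
    rw [PySem.List.pyGetD_natCast, List.getD_eq_getElem row 0 hp]
  rw [List.map_congr_left (fun t ht => hch t (by
        simp only [List.mem_range] at ht; omega))]
  rw [hwn, List.range_succ_eq_map, List.map_cons, List.map_map]
  have h0 : ((0:Nat):Int) = 0 := rfl
  rw [if_pos h0]
  congr 1
  have hlen : (PySem.Int.toChars row[p]).length ≤ w.toNat := by omega
  have : ∀ t : Nat,
      ((fun t : Nat => if (t:Int) = 0 then '|'
         else if (t:Int) - 1 < ((PySem.Int.toChars row[p]).length : Int)
              then PySem.List.pyGetD (PySem.Int.toChars row[p]) ((t:Int) - 1) ' ' else ' ') ∘ Nat.succ) t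
      = (if t < (PySem.Int.toChars row[p]).length
         then (PySem.Int.toChars row[p]).getD t ' ' else ' ') := by
    intro t
    simp only [Function.comp_apply]
    rw [if_neg (by push_cast; omega)]
    have hc : ((Nat.succ t : Nat) : Int) - 1 = (t : Int) := by push_cast; omega
    rw [hc, PySem.List.pyGetD_natCast]
    split_ifs with h1 h2 h3
    · rfl
    · omega
    · omega
    · rfl
  rw [List.map_congr_left (fun t _ => this t), pvRangePad _ _ hlen]
  unfold pvLjust
  congr 2
  omega

-- the cell area of an odd line, block by block
theorem pvOddCells (grid : List (List Int)) (w : Int) (hw : 0 ≤ w) (r : Int) (row : List Int)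
    (hrow : PySem.List.pyGetD grid r [] = row) (p : Nat) (hp : p ≤ row.length)
    (hb : ∀ e ∈ row.take p, ((PySem.Int.toChars e).length : Int) ≤ w) :
    (PySem.List.pyRange 0 ((w+1)*(p:Int)) 1).map (pvCharAt grid w (2*r+1))
    = ((row.take p).map (fun e => '|' :: pvLjust (PySem.Int.toChars e) w)).flatten := by
  induction p with
  | zero => simp [PySem.List.pyRange_one_eq_nil]
  | succ k ih =>
    have hk : k < row.length := by omega
    have hsplit : PySem.List.pyRange 0 ((w+1)*((k+1:Nat):Int)) 1
        = PySem.List.pyRange 0 ((w+1)*(k:Int)) 1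
          ++ PySem.List.pyRange ((w+1)*(k:Int)) ((w+1)*((k+1:Nat):Int)) 1 := by
      refine PySem.List.pyRange_one_append 0 ((w+1)*(k:Int)) _ (by positivity)
        (mul_le_mul_of_nonneg_left (by push_cast; omega) (by omega))
    rw [hsplit, List.map_append, ih (by omega)
          (fun e he => hb e (by rw [List.take_add_one]; exact List.mem_append_left _ he))]
    rw [List.take_add_one, List.getElem?_eq_getElem hk]
    simp only [Option.toList_some, List.map_append, List.flatten_append, List.map_cons,
               List.map_nil, List.flatten_cons, List.flatten_nil, List.append_nil]
    congr 1
    rw [PySem.List.pyRange_one]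
    have harith : ((w+1)*((k+1:Nat):Int) - (w+1)*(k:Int)) = w + 1 := by push_cast; ring
    rw [harith, List.map_map]
    have hbk : ((PySem.Int.toChars row[k]).length : Int) ≤ w :=
      hb row[k] (by rw [List.take_add_one, List.getElem?_eq_getElem hk]; exact List.mem_append_right _ (by simp))
    simpa [Function.comp_def] using pvBlock grid w hw r row hrow k hk hbk

-- a full odd line of B
theorem pvOddLine (grid : List (List Int)) (w : Int) (hw : 0 ≤ w) (r : Int) (row : List Int)
    (hrow : PySem.List.pyGetD grid r [] = row) (m : Nat) (hm : m ≤ row.length)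
    (hb : ∀ e ∈ row.take m, ((PySem.Int.toChars e).length : Int) ≤ w) :
    (PySem.List.pyRange 0 ((w+1)*(m:Int)+1) 1).map (pvCharAt grid w (2*r+1))
    = ((row.take m).map (fun e => '|' :: pvLjust (PySem.Int.toChars e) w)).flatten ++ ['|'] := by
  have hsplit : PySem.List.pyRange 0 ((w+1)*(m:Int)+1) 1
      = PySem.List.pyRange 0 ((w+1)*(m:Int)) 1 ++ [(w+1)*(m:Int)] := by
    rw [PySem.List.pyRange_one_succ_right (by positivity)]
  rw [hsplit, List.map_append, pvOddCells grid w hw r row hrow m hm hb]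
  have hmod0 : PySem.Int.mod ((w+1)*(m:Int)) (w+1) = 0 := by
    simpa using pvModBlock w (m:Int) 0 hw le_rfl (by omega)
  simp [pvCharAt, hmod0]

-- B reduces to the canonical shape
theorem pvB_eq (grid : List (List Int)) (m : Nat) (hlen : m ≤ grid.length)
    (hrows : ∀ row ∈ grid.take m, m ≤ row.length) :
    grid_to_string_with_size_alt grid (m : Int) = String.ofList (pvCanon grid m) := by
  have hw : 0 ≤ pvMaxLen grid := pvMaxLen_nonneg grid
  simp only [grid_to_string_with_size_alt, pvWfold]
  rw [pvOuterFold, pvLoopB]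
  refine congrArg String.ofList ?_
  simp only [List.nil_append, pvCanon]
  have hW : ((pvMaxLen grid + 1) * (m:Int) + 1).toNat = m * (pvMaxLen grid + 1).toNat + 1 := by
    have h1 : (((pvMaxLen grid + 1).toNat : Int)) = pvMaxLen grid + 1 :=
      Int.toNat_of_nonneg (by omega)
    have h2 : (pvMaxLen grid + 1) * (m:Int) + 1
        = ((m * (pvMaxLen grid + 1).toNat + 1 : Nat) : Int) := by push_cast [h1]; ring
    rw [h2, Int.toNat_natCast]
  have heven : ∀ j : Int, PySem.Int.mod j 2 = 0 →
      (PySem.List.pyRange 0 ((pvMaxLen grid + 1) * (m:Int) + 1) 1).map (pvCharAt grid (pvMaxLen grid) j)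
      = List.replicate (m * (pvMaxLen grid + 1).toNat + 1) '=' := by
    intro j hj
    rw [pvEvenLine grid (pvMaxLen grid) j _ hj, hW]
  have hodd : ∀ r : Nat, r < m →
      (PySem.List.pyRange 0 ((pvMaxLen grid + 1) * (m:Int) + 1) 1).map
        (pvCharAt grid (pvMaxLen grid) (2*(r:Int)+1))
      = (((PySem.List.pyGetD grid (r:Int) []).take m).map
          (fun e => '|' :: pvLjust (PySem.Int.toChars e) (pvMaxLen grid))).flatten ++ ['|'] := by
    intro r hr
    set row := PySem.List.pyGetD grid (r:Int) [] with hrowdef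
    have hrl : row = grid[r] := by
      rw [hrowdef, PySem.List.pyGetD_natCast, List.getD_eq_getElem grid [] (by omega)]
    have hmem : row ∈ grid.take m := by
      rw [hrl]; exact List.mem_take_iff_getElem.mpr ⟨r, by omega, rfl⟩
    have hml : m ≤ row.length := hrows row hmem
    have hb : ∀ e ∈ row.take m, ((PySem.Int.toChars e).length : Int) ≤ pvMaxLen grid := by
      intro e he
      exact pvMaxLen_bound grid row e (List.take_subset m grid hmem)
        (List.take_subset m row he)
    have := pvOddLine grid (pvMaxLen grid) hw (r:Int) row rfl m hml hb
    rw [show (pvMaxLen grid + 1) * (m:Int) = (pvMaxLen grid + 1) * (m:Int) from rfl] at this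
    exact this
  rw [heven 0 (pvModEven 0 ⟨0, by ring⟩)]
  have hrowline : ∀ (r : Nat), r ∈ List.range m →
      ((PySem.List.pyRange 0 ((pvMaxLen grid + 1) * (m:Int) + 1) 1).map
          (pvCharAt grid (pvMaxLen grid) (2*(r:Int)+1)) ++ ['\n'])
        ++ ((PySem.List.pyRange 0 ((pvMaxLen grid + 1) * (m:Int) + 1) 1).map
          (pvCharAt grid (pvMaxLen grid) (2*(r:Int)+2)) ++ ['\n'])
      = (fun r : Nat =>
          (((((PySem.List.pyGetD grid (r:Int) []).take m).map
            (fun e => '|' :: pvLjust (PySem.Int.toChars e) (pvMaxLen grid))).flatten ++ ['|'])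
           ++ '\n' :: List.replicate (m * (pvMaxLen grid + 1).toNat + 1) '=' ++ ['\n'])) r := by
    intro r hr
    rw [hodd r (List.mem_range.mp hr), heven (2*(r:Int)+2) (pvModEven _ ⟨(r:Int)+1, by ring⟩)]
    simp [List.append_assoc]
  rw [List.map_congr_left hrowline]
  rw [pvMapAccTake grid ([] : List Int)
      (fun R => (((R.take m).map
            (fun e => '|' :: pvLjust (PySem.Int.toChars e) (pvMaxLen grid))).flatten ++ ['|'])
           ++ '\n' :: List.replicate (m * (pvMaxLen grid + 1).toNat + 1) '=' ++ ['\n']) m hlen]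
  simp [List.append_assoc]

-- negative n: both render loops are empty and both return ""
theorem pvA_neg (grid : List (List Int)) (n : Int) (hn : n < 0) :
    grid_to_string_with_size grid n = String.ofList [] := by
  simp only [grid_to_string_with_size]
  rw [PySem.List.pyRange_one_eq_nil (by omega : 2*n+1 ≤ 0)]
  rfl

theorem pvB_neg (grid : List (List Int)) (n : Int) (hn : n < 0) :
    grid_to_string_with_size_alt grid n = String.ofList [] := by
  simp only [grid_to_string_with_size_alt]
  rw [PySem.List.pyRange_one_eq_nil (by omega : 2*n+1 ≤ 0)]
  rfl

-- ===== VERDICT (by name: the statement is the Claim_ definition above) =====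
theorem grid_to_string_with_size_spec : Claim_equal_grid_to_string_with_size := by
  intro grid n _ hpre
  unfold Spec_grid_to_string_with_size
  by_cases hn : 0 ≤ n
  · obtain ⟨hlen, hrows⟩ := hpre hn
    rw [show n = ((n.toNat : Nat) : Int) from (Int.toNat_of_nonneg hn).symm]
    rw [pvA_eq grid n.toNat hlen hrows, pvB_eq grid n.toNat hlen hrows]
  · rw [pvA_neg grid n (by omega), pvB_neg grid n (by omega)]
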